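-- pv_equiv track=rewrite | github.com/ored95/sussex24 | R2G4.py | Solution_Q5_origin
-- ===== SOURCE A (Python) =====
-- def Solution_Q5_origin(arr: list[int]) -> int:
--     """
--     Solution without ext. library, just dictionary
--     """
--     d = dict()
--     for x in arr:
--         if x not in d.keys():
--             d[x] = 1
--         else:
--             d[x] += 1
--     dv = sorted([d[x] for x in d], reverse=True)
--     s, c, k = len(arr) // 2, 0, 0
--     while s > 0:
--         s -= dv[k]
--         c += 1
--         k += 1
--     return c
-- ===== SOURCE B (Python) =====
-- def Solution_Q5_origin(arr: list[int]) -> int: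
--     freq = {}
--     for x in arr:
--         freq[x] = freq.get(x, 0) + 1
--     remaining = len(arr) // 2
--     if remaining <= 0:
--         return 0
--     maxf = max(freq.values())
--     cnt = {}
--     for f in freq.values():
--         cnt[f] = cnt.get(f, 0) + 1
--     res = 0
--     for f in range(maxf, 0, -1):
--         for _ in range(cnt.get(f, 0)):
--             if remaining <= 0:
--                 return res
--             remaining -= f
--             res += 1
--     return res
-- ===== Notes on version B (the rewrite author's own statement) =====
-- stated objective: alternative
-- what changed: Replaces sorting the frequency list descending and greedily walking it by a counting-sort style bucket pass: a frequency-of-frequencies dict is scanned from the maximum frequency downward, consuming each bucket's values until half the array is covered, so no comparison sort is performed.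
import Mathlib
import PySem

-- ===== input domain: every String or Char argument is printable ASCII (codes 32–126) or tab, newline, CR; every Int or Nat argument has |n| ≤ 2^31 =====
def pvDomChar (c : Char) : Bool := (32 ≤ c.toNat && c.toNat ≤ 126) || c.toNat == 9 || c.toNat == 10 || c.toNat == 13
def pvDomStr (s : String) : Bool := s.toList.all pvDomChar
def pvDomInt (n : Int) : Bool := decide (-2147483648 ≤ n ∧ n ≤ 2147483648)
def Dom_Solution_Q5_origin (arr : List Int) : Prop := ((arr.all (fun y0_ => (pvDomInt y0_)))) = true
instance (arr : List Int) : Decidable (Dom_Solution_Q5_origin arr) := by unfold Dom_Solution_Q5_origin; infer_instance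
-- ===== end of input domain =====

-- B replaces A's descending sort of the frequency list by a bucket (counting) pass over a
-- frequency-of-frequencies dict scanned from the maximum frequency downward (objective: alternative).

-- ===== PORT A =====
-- while s > 0: s -= dv[k]; c += 1; k += 1   (the list is consumed front to back; the [] case is
-- Python's IndexError, unreachable because the frequencies sum to len(arr) ≥ len(arr)//2)
def pvLoopA : List Int → Int → Int → Int
  | dv, s, c =>
    if s > 0 then
      match dv with
      | [] => c
      | f :: rest => pvLoopA rest (s - f) (c + 1)
    else c

def Solution_Q5_origin (arr : List Int) : Int :=
  let d := arr.foldl (fun d x =>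
      if !(PySem.Dict.contains d x) then PySem.Dict.insert d x 1
      else PySem.Dict.insert d x (PySem.Dict.getD d x 0 + 1))  -- d[x] += 1 (key present, so getD is exact)
    PySem.Dict.empty
  let dv := PySem.List.sorted ((PySem.Dict.keys d).map (fun x => PySem.Dict.getD d x 0)) (fun v => v) true
  pvLoopA dv (PySem.Int.floordiv (PySem.List.len arr) 2) 0

-- ===== PORT B =====
-- inner 'for _ in range(k)' with the early 'return res' signalled by Sum.inr
def pvBInner (f : Int) : Nat → Int → Int → (Int × Int) ⊕ Int
  | 0, rem, res => Sum.inl (rem, res)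
  | Nat.succ k, rem, res => if rem ≤ 0 then Sum.inr res else pvBInner f k (rem - f) (res + 1)

-- outer 'for f in range(maxf, 0, -1)'
def pvBOuter (cnt : PySem.Dict Int Int) : List Int → Int → Int → Int
  | [], _, res => res
  | f :: fs, rem, res =>
    match pvBInner f (PySem.Dict.getD cnt f 0).toNat rem res with
    | Sum.inl (rem', res') => pvBOuter cnt fs rem' res'
    | Sum.inr r => r

def Solution_Q5_origin_alt (arr : List Int) : Int :=
  let freq := arr.foldl (fun d x => PySem.Dict.insert d x (PySem.Dict.getD d x 0 + 1)) PySem.Dict.empty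
  let remaining := PySem.Int.floordiv (PySem.List.len arr) 2
  if remaining ≤ 0 then 0
  else
    match PySem.List.max? (PySem.Dict.values freq) (fun v => v) with
    | none => 0  -- unreachable: remaining > 0 forces arr ≠ [], so freq.values ≠ []
    | some maxf =>
      let cnt := (PySem.Dict.values freq).foldl
        (fun d f => PySem.Dict.insert d f (PySem.Dict.getD d f 0 + 1)) PySem.Dict.empty
      pvBOuter cnt (PySem.List.pyRange maxf 0 (-1)) remaining 0

-- ===== PRECONDITION & SPEC =====
def Spec_Solution_Q5_origin (arr : List Int) (out : Int) : Prop := out = Solution_Q5_origin_alt arr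
instance (arr : List Int) (out : Int) : Decidable (Spec_Solution_Q5_origin arr out) := by unfold Spec_Solution_Q5_origin; infer_instance

-- ===== CLAIM (what is proved, stated in full; the proofs are below) =====
def Claim_equal_Solution_Q5_origin : Prop := ∀ (arr : List Int), Dom_Solution_Q5_origin arr → Spec_Solution_Q5_origin arr (Solution_Q5_origin arr)

-- ===== LEMMAS AND PROOFS =====

lemma pvLoopA_of_nonpos (dv : List Int) (s c : Int) (h : s ≤ 0) : pvLoopA dv s c = c := by
  cases dv <;> simp only [pvLoopA] <;> split <;> omega

lemma pvLoopA_replicate_append (f : Int) (k : Nat) :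
    ∀ (rem res : Int) (tail : List Int),
      pvLoopA (List.replicate k f ++ tail) rem res =
        (match pvBInner f k rem res with
         | Sum.inl (r, c) => pvLoopA tail r c
         | Sum.inr c => c) := by
  induction k with
  | zero => intro rem res tail; simp [pvBInner]
  | succ k ih =>
    intro rem res tail
    by_cases h : rem ≤ 0
    · have : ¬ rem > 0 := by omega
      simp [pvBInner, h, List.replicate_succ, pvLoopA, this]
    · have h' : rem > 0 := by omega
      simp only [pvBInner, if_neg h, List.replicate_succ, List.cons_append]
      rw [show pvLoopA (f :: (List.replicate k f ++ tail)) rem res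
            = pvLoopA (List.replicate k f ++ tail) (rem - f) (res + 1) by
          simp [pvLoopA, h']]
      exact ih (rem - f) (res + 1) tail

lemma pvBOuter_eq_loopA (cnt : PySem.Dict Int Int) (fs : List Int) :
    ∀ (rem res : Int),
      pvBOuter cnt fs rem res =
        pvLoopA (fs.flatMap (fun f => List.replicate (PySem.Dict.getD cnt f 0).toNat f)) rem res := by
  induction fs with
  | nil =>
    intro rem res
    simp only [List.flatMap_nil, pvBOuter]
    by_cases h : rem > 0 <;> simp [pvLoopA, h]
  | cons f fs ih =>
    intro rem res
    simp only [List.flatMap_cons, pvBOuter]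
    rw [pvLoopA_replicate_append]
    cases hb : pvBInner f (PySem.Dict.getD cnt f 0).toNat rem res with
    | inl p => cases p with | mk r c => simp [ih r c]
    | inr r => simp

lemma count_flatMap_replicate (fs : List Int) (g : Int → Nat) (hnd : fs.Nodup) (v : Int) :
    (fs.flatMap (fun f => List.replicate (g f) f)).count v = if v ∈ fs then g v else 0 := by
  induction fs with
  | nil => simp
  | cons f fs ih =>
    rcases List.nodup_cons.mp hnd with ⟨hnf, hnd'⟩
    simp only [List.flatMap_cons, List.count_append, ih hnd', List.count_replicate]
    by_cases hv : v = f
    · subst hv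
      simp [hnf]
    · simp [hv, Ne.symm hv]

lemma pairwise_flatMap_replicate (fs : List Int) (g : Int → Nat)
    (h : fs.Pairwise (fun a b => b < a)) :
    (fs.flatMap (fun f => List.replicate (g f) f)).Pairwise (fun a b => b ≤ a) := by
  induction fs with
  | nil => simp
  | cons f fs ih =>
    rcases List.pairwise_cons.mp h with ⟨hf, h'⟩
    simp only [List.flatMap_cons]
    rw [List.pairwise_append]
    refine ⟨List.pairwise_replicate.mpr (Or.inr le_rfl), ih h', ?_⟩
    intro a ha b hb
    have ha' : a = f := List.eq_of_mem_replicate ha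
    rcases List.mem_flatMap.mp hb with ⟨f', hf', hbf'⟩
    have hb' : b = f' := List.eq_of_mem_replicate hbf'
    rw [ha', hb']
    exact le_of_lt (hf f' hf')

lemma sorted_desc_eq_flatMap (vs : List Int) (m : Int)
    (hmem : ∀ v ∈ vs, 1 ≤ v ∧ v ≤ m) :
    PySem.List.sorted vs (fun v => v) true =
      (PySem.List.pyRange m 0 (-1)).flatMap (fun f => List.replicate (vs.count f) f) := by
  have hnd : (PySem.List.pyRange m 0 (-1)).Nodup := by
    rw [PySem.List.pyRange_neg_one_eq_reverse]
    exact List.nodup_reverse.mpr (PySem.List.nodup_pyRange_one _ _)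
  have hpw : (PySem.List.pyRange m 0 (-1)).Pairwise (fun a b => b < a) := by
    rw [PySem.List.pyRange_neg_one_eq_reverse]
    exact (List.pairwise_reverse).mpr (PySem.List.pairwise_lt_pyRange_one _ _)
  have hcount : ∀ v, ((PySem.List.pyRange m 0 (-1)).flatMap
      (fun f => List.replicate (vs.count f) f)).count v = vs.count v := by
    intro v
    rw [count_flatMap_replicate _ (fun f => vs.count f) hnd v]
    by_cases hv : v ∈ PySem.List.pyRange m 0 (-1)
    · simp [hv]
    · have h0 : vs.count v = 0 := by
        rw [List.count_eq_zero]
        intro hvv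
        rcases hmem v hvv with ⟨h1, h2⟩
        exact hv (PySem.List.mem_pyRange_neg_one.mpr ⟨by omega, h2⟩)
      simp [hv, h0]
  have hperm : (PySem.List.sorted vs (fun v => v) true).Perm
      ((PySem.List.pyRange m 0 (-1)).flatMap (fun f => List.replicate (vs.count f) f)) :=
    (PySem.List.sorted_perm vs _ true).trans
      ((List.perm_iff_count).mpr (fun v => (hcount v).symm))
  refine PySem.List.eq_of_perm_of_pairwise_le_of_injective (fun x : Int => -x)
    (fun a b h => by dsimp at h; omega) hperm ?_ ?_
  · exact (PySem.List.sorted_pairwise_rev vs _).imp (fun h => by simp only; omega)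
  · exact (pairwise_flatMap_replicate _ _ hpw).imp (fun h => by simp only; omega)

-- ===== VERDICT (by name: the statement is the Claim_ definition above) =====
theorem Solution_Q5_origin_spec : Claim_equal_Solution_Q5_origin := by
  intro arr _
  unfold Spec_Solution_Q5_origin Solution_Q5_origin Solution_Q5_origin_alt
  have hfold : arr.foldl (fun d x =>
      if !(PySem.Dict.contains d x) then PySem.Dict.insert d x 1
      else PySem.Dict.insert d x (PySem.Dict.getD d x 0 + 1)) PySem.Dict.empty
      = PySem.Dict.counter arr := by
    rw [← PySem.Dict.foldl_insert_getD_add_one_eq_counter]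
    congr 1
    funext d x
    by_cases h : PySem.Dict.contains d x = true
    · simp [h]
    · have h0 : PySem.Dict.getD d x 0 = 0 :=
        PySem.Dict.getD_of_not_contains d 0 (by simp at h; exact h)
      simp [h, h0]
  simp only [hfold, PySem.Dict.foldl_insert_getD_add_one_eq_counter]
  have hmap : (fun x => PySem.Dict.getD (PySem.Dict.counter arr) x 0)
      = fun k => ((arr.count k : Int)) := funext (PySem.Dict.getD_counter arr)
  have hvalues : (PySem.Dict.counter arr).values
      = (PySem.Set.ofList arr).map (fun k => ((arr.count k : Int))) := by
    rw [PySem.Dict.values_eq_map_keys _ (PySem.Dict.nodup_keys_counter arr) 0,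
      PySem.Dict.keys_counter, hmap]
  by_cases hs : PySem.Int.floordiv (PySem.List.len arr) 2 ≤ 0
  · rw [pvLoopA_of_nonpos _ _ _ hs, if_pos hs]
  · rw [if_neg hs]
    set vs : List Int := (PySem.Set.ofList arr).map (fun k => ((arr.count k : Int))) with hvs
    rw [hmap, PySem.Dict.keys_counter, hvalues]
    cases hmax : PySem.List.max? vs (fun v => v) with
    | none =>
      exact absurd ((PySem.List.max?_eq_none_iff vs _).mp hmax)
        (by
          intro hnil
          have harr : arr = [] := by
            cases arr with
            | nil => rfl
            | cons x t =>
              have hx : x ∈ PySem.Set.ofList (x :: t) :=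
                (PySem.Set.mem_ofList _ _).mpr (List.mem_cons_self)
              have : ((x :: t).count x : Int) ∈ vs := by
                rw [hvs]; exact List.mem_map_of_mem hx
              rw [hnil] at this
              simp at this
          rw [harr] at hs
          exact hs (by decide))
    | some maxf =>
      have hmem : ∀ v ∈ vs, 1 ≤ v ∧ v ≤ maxf := by
        intro v hv
        constructor
        · rcases List.mem_map.mp (hvs ▸ hv) with ⟨k, hk, hkv⟩
          have hk' : k ∈ arr := (PySem.Set.mem_ofList _ _).mp hk
          have : 0 < arr.count k := List.count_pos_iff.mpr hk'
          omega
        · exact PySem.List.max?_isMax hmax v hv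
      dsimp only
      rw [pvBOuter_eq_loopA]
      simp only [PySem.Dict.getD_counter, Int.toNat_natCast]
      rw [sorted_desc_eq_flatMap vs maxf hmem]
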